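-- pv_equiv track=rewrite | github.com/IKNOWINOT/Murphy-System | src/llm_controller.py | _decompose_response
-- ===== SOURCE A (Python) =====
-- from typing import Any, Dict, List, Optional, Tuple
--
-- def _decompose_response(response: str) -> List[str]:
--     """Decompose response into sub-tasks"""
--     # Simple implementation - split by common markers
--     sub_tasks = []
--     lines = response.split('\n')
--
--     current_task = ""
--     for line in lines:
--         if any(marker in line for marker in ["First,", "Next,", "Then,", "After that,", "Step"]):
--             if current_task:
--                 sub_tasks.append(current_task.strip())
--             current_task = line
--         else:
--             current_task += "\n" + line
--
--     if current_task:
--         sub_tasks.append(current_task.strip())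
--
--     return sub_tasks
-- ===== SOURCE B (Python) =====
-- from typing import List
--
-- def _decompose_response(response: str) -> List[str]:
--     """Decompose response into sub-tasks (right-to-left segment builder)."""
--     markers = ("First,", "Next,", "Then,", "After that,", "Step")
--     segs = []   # list of segments, each a list of lines; built back-to-front
--     cur = []
--     for line in reversed(response.split('\n')):
--         cur = [line] + cur
--         if any(m in line for m in markers):
--             segs = [cur] + segs
--             cur = []
--     if cur:
--         segs = [cur] + segs
--     return ["\n".join(s).strip() for s in segs]
-- ===== Notes on version B (the rewrite author's own statement) =====
-- stated objective: alternative
-- what changed: Instead of accumulating a growing string and emitting a stripped task at each marker boundary (plus a final flush), B builds the list of segments back-to-front by a single reverse traversal collecting lines per segment, then maps join+strip over the segments.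
import Mathlib
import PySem

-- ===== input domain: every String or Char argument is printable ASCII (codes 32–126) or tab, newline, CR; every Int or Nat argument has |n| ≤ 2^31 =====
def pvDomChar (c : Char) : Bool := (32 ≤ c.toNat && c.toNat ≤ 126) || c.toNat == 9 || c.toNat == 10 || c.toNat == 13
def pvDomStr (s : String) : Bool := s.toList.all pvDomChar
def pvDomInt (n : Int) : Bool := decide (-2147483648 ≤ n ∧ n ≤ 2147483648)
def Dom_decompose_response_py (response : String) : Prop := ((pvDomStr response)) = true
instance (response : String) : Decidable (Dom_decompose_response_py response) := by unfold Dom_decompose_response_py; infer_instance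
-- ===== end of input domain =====

-- B replaces A's forward string-accumulator-with-flush by a reverse pass that groups lines
-- into segments and then maps join+strip over them (objective: alternative decomposition).

-- shared by both ports: the marker list
def pvMarkers : List (List Char) :=
  ["First,".toList, "Next,".toList, "Then,".toList, "After that,".toList, "Step".toList]

-- ===== PORT A =====
def pvIsMarker (line : List Char) : Bool :=
  pvMarkers.any (fun m => PySem.Chars.isIn m line)

-- one iteration of A's loop over (sub_tasks, current_task)
def pvStepA (acc : List (List Char) × List Char) (line : List Char) :
    List (List Char) × List Char :=
  if pvIsMarker line then
    (if acc.2 = [] then acc.1 else acc.1 ++ [PySem.Chars.strip acc.2], line)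
  else
    (acc.1, acc.2 ++ '\n' :: line)

def decompose_response_py (response : String) : List String :=
  let lines := PySem.Chars.splitOn response.toList "\n".toList
  let st := lines.foldl pvStepA ([], [])
  let subs := if st.2 = [] then st.1 else st.1 ++ [PySem.Chars.strip st.2]
  subs.map String.ofList

-- ===== PORT B =====
-- one iteration of B's reverse loop over (segs, cur); `for line in reversed(...)` = foldr
def pvStepB (line : List Char) (acc : List (List (List Char)) × List (List Char)) :
    List (List (List Char)) × List (List Char) :=
  let cur := line :: acc.2
  if pvIsMarker line then (cur :: acc.1, []) else (acc.1, cur)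

def decompose_response_py_alt (response : String) : List String :=
  let lines := PySem.Chars.splitOn response.toList "\n".toList
  let st := lines.foldr pvStepB ([], [])
  let segs := if st.2 = [] then st.1 else st.2 :: st.1
  segs.map (fun s => String.ofList (PySem.Chars.strip (PySem.Chars.join ['\n'] s)))

-- ===== PRECONDITION & SPEC =====
def Spec_decompose_response_py (response : String) (out : List String) : Prop := out = decompose_response_py_alt response
instance (response : String) (out : List String) : Decidable (Spec_decompose_response_py response out) := by unfold Spec_decompose_response_py; infer_instance

-- ===== CLAIM (what is proved, stated in full; the proofs are below) =====
def Claim_equal_decompose_response_py : Prop := ∀ (response : String), Dom_decompose_response_py response → Spec_decompose_response_py response (decompose_response_py response)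

-- ===== LEMMAS AND PROOFS =====

-- A's current_task after consuming the (marker-free) lines `pre` starting from `cur`
def pvExt (cur : List Char) (pre : List (List Char)) : List Char :=
  pre.foldl (fun c l => c ++ '\n' :: l) cur

theorem pvExt_join (pre : List (List Char)) (cur : List Char) :
    pvExt cur pre = PySem.Chars.join ['\n'] (cur :: pre) := by
  induction pre generalizing cur with
  | nil => simp [pvExt, PySem.Chars.join_singleton]
  | cons p ps ih =>
    have : pvExt cur (p :: ps) = pvExt (cur ++ '\n' :: p) ps := rfl
    rw [this, ih]
    cases ps with
    | nil => simp [PySem.Chars.join_singleton, PySem.Chars.join_cons_cons]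
    | cons q qs => simp [PySem.Chars.join_cons_cons]

theorem pvMarker_ne_nil (l : List Char) (h : pvIsMarker l = true) : l ≠ [] := by
  intro hnil; subst hnil; revert h; decide

theorem pvJoin_cons_ne_nil (l : List Char) (pre : List (List Char)) (hl : l ≠ []) :
    PySem.Chars.join ['\n'] (l :: pre) ≠ [] := by
  cases pre with
  | nil => simpa [PySem.Chars.join_singleton] using hl
  | cons p ps =>
    rw [PySem.Chars.join_cons_cons]
    simp

theorem pvStrip_newline (s : List Char) :
    PySem.Chars.strip ('\n' :: s) = PySem.Chars.strip s := by
  simp [PySem.Chars.strip, PySem.Chars.lstrip, List.dropWhile, PySem.Chars.isspace]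

-- the loop correspondence: A's fold with generalized state vs B's foldr
theorem pvMain (ls : List (List Char)) :
    ∀ (acc : List (List Char)) (cur : List Char),
    (let st := ls.foldl pvStepA (acc, cur);
     if st.2 = [] then st.1 else st.1 ++ [PySem.Chars.strip st.2])
    =
    acc ++
      ((let sb := ls.foldr pvStepB ([], []);
        (if pvExt cur sb.2 = [] then [] else [PySem.Chars.strip (pvExt cur sb.2)]) ++
          sb.1.map (fun s => PySem.Chars.strip (PySem.Chars.join ['\n'] s)))) := by
  induction ls with
  | nil =>
    intro acc cur
    by_cases h : cur = [] <;> simp [pvExt, h]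
  | cons l ls ih =>
    intro acc cur
    simp only [List.foldl_cons]
    by_cases hm : pvIsMarker l
    · have hstep : pvStepA (acc, cur) l =
        ((if cur = [] then acc else acc ++ [PySem.Chars.strip cur]), l) := by
        simp [pvStepA, hm]
      rw [hstep, ih]
      have hB : (l :: ls).foldr pvStepB ([], []) =
          ((l :: (ls.foldr pvStepB ([], [])).2) :: (ls.foldr pvStepB ([], [])).1, []) := by
        simp [List.foldr, pvStepB, hm]
      rw [hB]
      have hjoin := pvExt_join (ls.foldr pvStepB ([], [])).2 l
      have hne : pvExt l (ls.foldr pvStepB ([], [])).2 ≠ [] := by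
        rw [hjoin]
        exact pvJoin_cons_ne_nil _ _ (pvMarker_ne_nil l hm)
      have hne' : PySem.Chars.join ['\n'] (l :: (List.foldr pvStepB ([], []) ls).2) ≠ [] :=
        hjoin ▸ hne
      simp only [hjoin]
      by_cases hc : cur = [] <;> simp [pvExt, hc, hne']
    · have hstep : pvStepA (acc, cur) l = (acc, cur ++ '\n' :: l) := by
        simp [pvStepA, hm]
      rw [hstep, ih]
      have hB : (l :: ls).foldr pvStepB ([], []) =
          ((ls.foldr pvStepB ([], [])).1, l :: (ls.foldr pvStepB ([], [])).2) := by
        simp [List.foldr, pvStepB, hm]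
      rw [hB]
      rfl

-- pvExt from the empty current_task prefixes one '\n' to the joined segment
theorem pvExt_nil_cons (p : List Char) (ps : List (List Char)) :
    pvExt [] (p :: ps) = '\n' :: PySem.Chars.join ['\n'] (p :: ps) := by
  have h := pvExt_join (p :: ps) []
  rw [h]
  cases ps with
  | nil => simp [PySem.Chars.join_singleton, PySem.Chars.join_cons_cons]
  | cons q qs => simp [PySem.Chars.join_cons_cons]

-- the whole computation agrees on the character-list level
theorem pvCharsEq (lines : List (List Char)) :
    (if (lines.foldl pvStepA ([], [])).2 = [] then (lines.foldl pvStepA ([], [])).1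
     else (lines.foldl pvStepA ([], [])).1 ++ [PySem.Chars.strip (lines.foldl pvStepA ([], [])).2])
    =
    (if (lines.foldr pvStepB ([], [])).2 = [] then (lines.foldr pvStepB ([], [])).1
     else (lines.foldr pvStepB ([], [])).2 :: (lines.foldr pvStepB ([], [])).1).map
      (fun s => PySem.Chars.strip (PySem.Chars.join ['\n'] s)) := by
  have h := pvMain lines [] []
  simp only [List.nil_append] at h
  rw [h]
  cases hpre : (List.foldr pvStepB ([], []) lines).2 with
  | nil => simp [pvExt]
  | cons p ps =>
    have hne : pvExt [] (p :: ps) ≠ [] := by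
      rw [pvExt_nil_cons]; simp
    simp only [pvExt_nil_cons, pvStrip_newline]
    simp

-- ===== VERDICT (by name: the statement is the Claim_ definition above) =====
theorem decompose_response_py_spec : Claim_equal_decompose_response_py := by
  intro response _
  unfold Spec_decompose_response_py decompose_response_py decompose_response_py_alt
  dsimp only
  rw [pvCharsEq, List.map_map]
  rfl
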